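-- pv_equiv track=rewrite | github.com/tonpe3141-ctrl/garmin-to-notion | src/ガーミン活動データ取得.py | format_training_message
-- ===== SOURCE A (Python) =====
-- def format_training_message(message: str) -> str:
--     messages = {
--         'NO_': '効果なし', 'MINOR_': 'わずかな効果', 'RECOVERY_': 'リカバリー',
--         'MAINTAINING_': '維持', 'IMPROVING_': '向上', 'IMPACTING_': '影響あり',
--         'HIGHLY_': '高い影響', 'OVERREACHING_': 'オーバーリーチ'
--     }
--     for key, value in messages.items():
--         if message.startswith(key): return value
--     return message
-- ===== SOURCE B (Python) =====
-- def format_training_message(message: str) -> str: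
--     # Extract the first '_'-delimited token and dispatch on it directly:
--     # every prefix the original scans for is exactly that token plus '_'.
--     head, sep, _tail = message.partition('_')
--     if not sep:
--         return message
--     if head == 'NO': return '効果なし'
--     if head == 'MINOR': return 'わずかな効果'
--     if head == 'RECOVERY': return 'リカバリー'
--     if head == 'MAINTAINING': return '維持'
--     if head == 'IMPROVING': return '向上'
--     if head == 'IMPACTING': return '影響あり'
--     if head == 'HIGHLY': return '高い影響'
--     if head == 'OVERREACHING': return 'オーバーリーチ'
--     return message
-- ===== Notes on version B (the rewrite author's own statement) =====
-- stated objective: alternative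
-- what changed: Replaces the loop of startswith tests over a dict of prefixes by extracting the first underscore-delimited token with partition('_') and dispatching on it with direct equality comparisons (no dict, no prefix scan); valid because every key is exactly that token plus '_'.
import Mathlib
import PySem

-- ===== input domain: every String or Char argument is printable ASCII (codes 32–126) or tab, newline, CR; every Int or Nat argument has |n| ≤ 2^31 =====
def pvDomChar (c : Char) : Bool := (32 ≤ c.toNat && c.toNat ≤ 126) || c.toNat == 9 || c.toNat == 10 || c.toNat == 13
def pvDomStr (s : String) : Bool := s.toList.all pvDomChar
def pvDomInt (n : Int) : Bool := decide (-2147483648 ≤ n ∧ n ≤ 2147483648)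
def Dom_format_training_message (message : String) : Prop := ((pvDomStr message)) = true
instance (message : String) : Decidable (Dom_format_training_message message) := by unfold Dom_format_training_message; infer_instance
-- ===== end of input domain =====

-- B extracts the first '_'-delimited token and dispatches on it with direct equality tests instead of scanning all prefixes with startswith.


-- ===== PORT A =====
-- the dict literal, as an insertion-ordered association list
def pvMessagesA : List (String × String) :=
  [("NO_", "効果なし"), ("MINOR_", "わずかな効果"), ("RECOVERY_", "リカバリー"),
   ("MAINTAINING_", "維持"), ("IMPROVING_", "向上"), ("IMPACTING_", "影響あり"),
   ("HIGHLY_", "高い影響"), ("OVERREACHING_", "オーバーリーチ")]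

-- the for-loop over messages.items(), returning value on the first startswith match
def pvLoopA : List (String × String) → String → String
  | [], m => m
  | (k, v) :: rest, m => if PySem.Str.startswith m k then v else pvLoopA rest m

def format_training_message (message : String) : String :=
  pvLoopA pvMessagesA message

-- ===== PORT B =====
-- message.partition('_') ported by hand (exact for a 1-char separator):
-- head = chars before the first '_'; sep is non-empty iff '_' occurs in message.
def format_training_message_alt (message : String) : String :=
  let l := message.toList
  if '_' ∈ l then
    let head := String.ofList (l.takeWhile (· != '_'))
    if head = "NO" then "効果なし"
    else if head = "MINOR" then "わずかな効果"
    else if head = "RECOVERY" then "リカバリー"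
    else if head = "MAINTAINING" then "維持"
    else if head = "IMPROVING" then "向上"
    else if head = "IMPACTING" then "影響あり"
    else if head = "HIGHLY" then "高い影響"
    else if head = "OVERREACHING" then "オーバーリーチ"
    else message
  else message

-- ===== PRECONDITION & SPEC =====
def Spec_format_training_message (message : String) (out : String) : Prop := out = format_training_message_alt message
instance (message : String) (out : String) : Decidable (Spec_format_training_message message out) := by unfold Spec_format_training_message; infer_instance

-- ===== CLAIM (what is proved, stated in full; the proofs are below) =====
def Claim_equal_format_training_message : Prop := ∀ (message : String), Dom_format_training_message message → Spec_format_training_message message (format_training_message message)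

-- ===== LEMMAS AND PROOFS =====

theorem pvPrefixUnderscore : ∀ (kc l : List Char), '_' ∉ kc →
    ((kc ++ ['_'] <+: l) ↔ ('_' ∈ l ∧ l.takeWhile (· != '_') = kc))
  | [], [], _ => by simp
  | [], c :: t, _ => by
    by_cases hc : c = '_'
    · subst hc; simp [List.cons_prefix_cons]
    · simp [hc, List.cons_prefix_cons, Ne.symm hc]
  | a :: kc, [], h => by simp
  | a :: kc, c :: t, h => by
    have ha : a ≠ '_' := fun he => h (he ▸ List.mem_cons_self)
    have hk : '_' ∉ kc := fun he => h (List.mem_cons_of_mem _ he)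
    have ih := pvPrefixUnderscore kc t hk
    by_cases hc : c = a
    · subst hc
      simp [List.cons_prefix_cons, ha, ih]
      tauto
    · apply iff_of_false
      · intro hp
        rw [List.cons_append, List.cons_prefix_cons] at hp
        exact hc hp.1.symm
      · rintro ⟨-, htw⟩
        by_cases hcu : c = '_'
        · simp [hcu] at htw
        · simp [hcu] at htw
          exact hc htw.1

theorem pvStartsKey (l kc : List Char) (h : '_' ∉ kc) :
    (PySem.Chars.startswith l (kc ++ ['_']) = true) ↔
      ('_' ∈ l ∧ l.takeWhile (· != '_') = kc) := by
  rw [PySem.Chars.startswith_iff]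
  exact pvPrefixUnderscore kc l h

-- startswith on a key "X_" ↔ '_' occurs and the head token is X
theorem pvStartsNO (l : List Char) : (PySem.Chars.startswith l "NO_".toList = true) ↔ ('_' ∈ l ∧ l.takeWhile (· != '_') = "NO".toList) :=
  pvStartsKey l "NO".toList (by decide)
theorem pvStartsMINOR (l : List Char) : (PySem.Chars.startswith l "MINOR_".toList = true) ↔ ('_' ∈ l ∧ l.takeWhile (· != '_') = "MINOR".toList) :=
  pvStartsKey l "MINOR".toList (by decide)
theorem pvStartsRECOVERY (l : List Char) : (PySem.Chars.startswith l "RECOVERY_".toList = true) ↔ ('_' ∈ l ∧ l.takeWhile (· != '_') = "RECOVERY".toList) :=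
  pvStartsKey l "RECOVERY".toList (by decide)
theorem pvStartsMAINTAINING (l : List Char) : (PySem.Chars.startswith l "MAINTAINING_".toList = true) ↔ ('_' ∈ l ∧ l.takeWhile (· != '_') = "MAINTAINING".toList) :=
  pvStartsKey l "MAINTAINING".toList (by decide)
theorem pvStartsIMPROVING (l : List Char) : (PySem.Chars.startswith l "IMPROVING_".toList = true) ↔ ('_' ∈ l ∧ l.takeWhile (· != '_') = "IMPROVING".toList) :=
  pvStartsKey l "IMPROVING".toList (by decide)
theorem pvStartsIMPACTING (l : List Char) : (PySem.Chars.startswith l "IMPACTING_".toList = true) ↔ ('_' ∈ l ∧ l.takeWhile (· != '_') = "IMPACTING".toList) :=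
  pvStartsKey l "IMPACTING".toList (by decide)
theorem pvStartsHIGHLY (l : List Char) : (PySem.Chars.startswith l "HIGHLY_".toList = true) ↔ ('_' ∈ l ∧ l.takeWhile (· != '_') = "HIGHLY".toList) :=
  pvStartsKey l "HIGHLY".toList (by decide)
theorem pvStartsOVERREACHING (l : List Char) : (PySem.Chars.startswith l "OVERREACHING_".toList = true) ↔ ('_' ∈ l ∧ l.takeWhile (· != '_') = "OVERREACHING".toList) :=
  pvStartsKey l "OVERREACHING".toList (by decide)

theorem pvHeadEq (l : List Char) (s : String) :
    (String.ofList (l.takeWhile (· != '_')) = s) ↔ l.takeWhile (· != '_') = s.toList := by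
  rw [← String.toList_inj, String.toList_ofList]

theorem format_training_message_spec' (m : String) :
    format_training_message m = format_training_message_alt m := by
  unfold format_training_message format_training_message_alt pvMessagesA
  simp only [pvLoopA, PySem.Str.startswith_eq, pvHeadEq,
    pvStartsNO, pvStartsMINOR, pvStartsRECOVERY, pvStartsMAINTAINING,
    pvStartsIMPROVING, pvStartsIMPACTING, pvStartsHIGHLY, pvStartsOVERREACHING]
  by_cases hm : '_' ∈ m.toList
  · simp only [hm, true_and, if_true]
  · simp [hm]

-- ===== VERDICT (by name: the statement is the Claim_ definition above) =====
theorem format_training_message_spec : Claim_equal_format_training_message := by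
  intro m _
  unfold Spec_format_training_message
  exact format_training_message_spec' m
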